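-- pv_equiv track=rewrite | github.com/ChoHyoungSeo/Algorithm_prac | python/programmers/LV2/repeat_binary_transform.py | solution
-- ===== SOURCE A (Python) =====
-- from collections import Counter
--
-- def solution(s):
--     answer = []
--     cnt = 0
--     zeros = 0
--     while True:
--         ones = Counter(s)['1']
--         zeros += Counter(s)['0']
--         if ones == 1:
--             cnt += 1
--             break
--         s = format(ones, 'b')
--         cnt += 1
--     answer.append(cnt)
--     answer.append(zeros)
--     return answer
-- ===== SOURCE B (Python) =====
-- def solution(s):
--     ones = s.count('1')
--     # dynamic programming: steps[k] / removed[k] = transform count and removed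
--     # zeros for the chain starting at integer k, built bottom-up (popcount(k) < k)
--     steps = [0] * (ones + 1)
--     removed = [0] * (ones + 1)
--     if ones >= 1:
--         steps[1] = 1
--     for k in range(2, ones + 1):
--         b = bin(k)[2:]
--         p = b.count('1')
--         steps[k] = steps[p] + 1
--         removed[k] = removed[p] + len(b) - p
--     return [steps[ones], removed[ones] + s.count('0')]
-- ===== Notes on version B (the rewrite author's own statement) =====
-- stated objective: alternative
-- what changed: B replaces A's step-by-step re-simulation (rebuild the binary string, re-count each round) by a bottom-up dynamic-programming pass that tabulates (transform count, removed zeros) for every integer up to the input's one-count, then answers with a single table lookup.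
import Mathlib
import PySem

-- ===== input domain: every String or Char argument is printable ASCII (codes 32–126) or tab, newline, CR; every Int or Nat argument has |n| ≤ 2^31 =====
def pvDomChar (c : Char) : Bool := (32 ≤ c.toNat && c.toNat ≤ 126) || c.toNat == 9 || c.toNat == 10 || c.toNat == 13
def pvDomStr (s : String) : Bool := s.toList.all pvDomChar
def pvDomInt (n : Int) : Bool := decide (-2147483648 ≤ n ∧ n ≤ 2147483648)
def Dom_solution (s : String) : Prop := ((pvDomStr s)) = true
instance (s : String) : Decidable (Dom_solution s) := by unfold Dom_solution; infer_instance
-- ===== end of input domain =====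

-- B replaces A's step-by-step re-simulation by a bottom-up dynamic-programming table of
-- (transform count, removed zeros) for every integer up to the input's one-count, then a
-- single lookup (objective: alternative). A's loop carries a fuel argument purely to make
-- the recursion total in Lean; the fuel supplied at the call site suffices on Pre_.

-- ===== PORT A =====

-- binary digit as a character
def pvBitChar (b : Bool) : Char := if b then '1' else '0'

-- format(n,'b') / bin(n)[2:]: binary digits most significant first, via the
-- little-endian digit list Nat.bits (Python gives "0" for n = 0; Nat.bits 0 = [])
def pvToBin (n : Nat) : List Char :=
  if n = 0 then ['0'] else ((Nat.bits n).map pvBitChar).reverse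

-- the while-True loop of A; fuel only makes it total — the ones = 0 / out-of-fuel
-- branches are never reached on Pre_solution (the Python loops forever there)
def pvALoop : Nat → List Char → Int → Int → List Int
  | 0, _, _, _ => [0, 0]
  | fuel+1, s, cnt, zeros =>
    let ones := s.count '1'
    let zeros := zeros + (s.count '0' : Int)
    if ones = 1 then [cnt + 1, zeros]
    else if ones = 0 then [0, 0]
    else pvALoop fuel (pvToBin ones) (cnt + 1) zeros

def solution (s : String) : List Int :=
  pvALoop (s.toList.count '1' + 1) s.toList 0 0

-- ===== PORT B =====

-- one body of B's table-filling for-loop: read row p = popcount k, write row k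
def pvBRow (st : List Int × List Int) (k : Nat) : List Int × List Int :=
  let b := pvToBin k
  let p := b.count '1'
  (st.1.set k (st.1.getD p 0 + 1),
   st.2.set k (st.2.getD p 0 + ((b.length - p : Nat) : Int)))

def solution_alt (s : String) : List Int :=
  let ones := s.toList.count '1'
  let steps0 : List Int := List.replicate (ones + 1) 0
  let removed0 : List Int := List.replicate (ones + 1) 0
  let steps1 := if 1 ≤ ones then steps0.set 1 1 else steps0
  let st := (PySem.List.pyRange 2 (ones + 1) 1).foldl (fun st k => pvBRow st k.toNat)
      (steps1, removed0)
  [st.1.getD ones 0, st.2.getD ones 0 + (s.toList.count '0' : Int)]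

-- ===== PRECONDITION & SPEC =====
-- Pre_ excludes strings holding no '1' digit: there the Python A (and B's table lookup at
-- index 0) has no defined answer — A never terminates.
def Pre_solution (s : String) : Prop := '1' ∈ s.toList
instance (s : String) : Decidable (Pre_solution s) := by unfold Pre_solution; infer_instance
def pvWitness_solution : String := "110"

def Spec_solution (s : String) (out : List Int) : Prop := out = solution_alt s
instance (s : String) (out : List Int) : Decidable (Spec_solution s out) := by unfold Spec_solution; infer_instance

-- ===== CLAIM (what is proved, stated in full; the proofs are below) =====
def Claim_equal_solution : Prop := ∀ (s : String), Dom_solution s → Pre_solution s → Spec_solution s (solution s)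

-- ===== LEMMAS AND PROOFS =====

-- bin(n).count('1') and n.bit_length()
def pvPopcount (n : Nat) : Nat := (Nat.bits n).count true
def pvBitLen (n : Nat) : Nat := (Nat.bits n).length

theorem count1_map_pvBitChar (l : List Bool) :
    (l.map pvBitChar).count '1' = l.count true := by
  induction l with
  | nil => rfl
  | cons b t ih => cases b <;> simp [pvBitChar, ih]

theorem count0_map_pvBitChar (l : List Bool) :
    (l.map pvBitChar).count '0' = l.count false := by
  induction l with
  | nil => rfl
  | cons b t ih => cases b <;> simp [pvBitChar, ih]

theorem count_true_add_false (l : List Bool) : l.count true + l.count false = l.length := by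
  induction l with
  | nil => rfl
  | cons b t ih => cases b <;> simp <;> omega

theorem count1_pvToBin (n : Nat) (h : n ≠ 0) : (pvToBin n).count '1' = pvPopcount n := by
  rw [pvToBin, if_neg h, List.count_reverse, count1_map_pvBitChar, pvPopcount]

theorem count0_pvToBin (n : Nat) (h : n ≠ 0) :
    ((pvToBin n).count '0' : Int) = ((pvBitLen n - pvPopcount n : Nat) : Int) := by
  have h1 := count_true_add_false (Nat.bits n)
  rw [pvToBin, if_neg h, List.count_reverse, count0_map_pvBitChar, pvPopcount, pvBitLen]
  omega

theorem length_pvToBin (n : Nat) (h : n ≠ 0) : (pvToBin n).length = pvBitLen n := by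
  rw [pvToBin, if_neg h, List.length_reverse, List.length_map, pvBitLen]

theorem pvPop_le (n : Nat) : pvPopcount n ≤ n := by
  induction n using Nat.strong_induction_on with
  | _ n ih =>
    by_cases hn0 : n = 0
    · simp [hn0, pvPopcount, Nat.zero_bits]
    · rcases Nat.even_or_odd n with ⟨m, hm⟩ | ⟨m, hm⟩
      · have hm' : n = 2 * m := by omega
        have h := ih m (by omega)
        rw [hm', pvPopcount, Nat.bit0_bits m (by omega),
          List.count_cons_of_ne (by decide)]
        unfold pvPopcount at h
        omega
      · have h := ih m (by omega)
        rw [hm, pvPopcount, Nat.bit1_bits m, List.count_cons_self]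
        unfold pvPopcount at h
        omega

theorem pvPop_pos (n : Nat) (hn : 1 ≤ n) : 1 ≤ pvPopcount n := by
  induction n using Nat.strong_induction_on with
  | _ n ih =>
    rcases Nat.even_or_odd n with ⟨m, hm⟩ | ⟨m, hm⟩
    · have hm' : n = 2 * m := by omega
      have h := ih m (by omega) (by omega)
      rw [hm', pvPopcount, Nat.bit0_bits m (by omega),
        List.count_cons_of_ne (by decide)]
      unfold pvPopcount at h
      omega
    · rw [hm, pvPopcount, Nat.bit1_bits m, List.count_cons_self]
      omega

theorem pvPop_lt (n : Nat) (hn : 2 ≤ n) : pvPopcount n < n := by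
  rcases Nat.even_or_odd n with ⟨m, hm⟩ | ⟨m, hm⟩
  · have hm' : n = 2 * m := by omega
    have h := pvPop_le m
    rw [hm', pvPopcount, Nat.bit0_bits m (by omega),
      List.count_cons_of_ne (by decide)]
    unfold pvPopcount at h
    omega
  · have h := pvPop_le m
    rw [hm, pvPopcount, Nat.bit1_bits m, List.count_cons_self]
    unfold pvPopcount at h
    omega

-- the mathematical chain value both programs compute: (steps, removed zeros) from n
def pvChain (n : Nat) : Int × Int :=
  if _hn : n ≤ 1 then (1, 0)
  else
    let p := pvPopcount n
    let c := pvChain p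
    (c.1 + 1, c.2 + ((pvBitLen n - p : Nat) : Int))
termination_by n
decreasing_by exact pvPop_lt n (by omega)

-- A's loop computes the chain value
theorem pvALoop_closed (fuel : Nat) (s : List Char) (cnt zeros : Int)
    (h1 : 1 ≤ s.count '1') (h2 : s.count '1' ≤ fuel) :
    pvALoop fuel s cnt zeros =
      [cnt + (pvChain (s.count '1')).1, zeros + (s.count '0' : Int) + (pvChain (s.count '1')).2] := by
  induction fuel generalizing s cnt zeros with
  | zero => omega
  | succ f ih =>
    rw [pvALoop]
    by_cases he : s.count '1' = 1
    · rw [pvChain]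
      simp [he]
    · have hge : 2 ≤ s.count '1' := by omega
      simp only [if_neg he, if_neg (by omega : ¬ s.count '1' = 0)]
      rw [ih (pvToBin (s.count '1')) _ _
            (by rw [count1_pvToBin _ (by omega)]; exact pvPop_pos _ (by omega))
            (by rw [count1_pvToBin _ (by omega)]; have := pvPop_lt (s.count '1') hge; omega)]
      rw [count1_pvToBin _ (by omega), count0_pvToBin _ (by omega)]
      conv_rhs => rw [pvChain]
      rw [dif_neg (by omega : ¬ List.count '1' s ≤ 1)]
      simp only [List.cons.injEq, and_true]
      constructor <;> ring

-- the invariant of B's table: lengths fixed, entries 1 ≤ j < m hold the chain values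
def pvTabInv (ones m : Nat) (st : List Int × List Int) : Prop :=
  st.1.length = ones + 1 ∧ st.2.length = ones + 1 ∧
  ∀ j, 1 ≤ j → j < m → st.1.getD j 0 = (pvChain j).1 ∧ st.2.getD j 0 = (pvChain j).2

theorem getD_set_self (l : List Int) (k : Nat) (v : Int) (h : k < l.length) :
    (l.set k v).getD k 0 = v := by
  simp [List.getD, h]

theorem getD_set_ne (l : List Int) (k j : Nat) (v : Int) (h : j ≠ k) :
    (l.set k v).getD j 0 = l.getD j 0 := by
  simp [List.getD, List.getElem?_set_ne (by omega : k ≠ j)]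

theorem pvBRow_inv (ones m : Nat) (st : List Int × List Int)
    (hm2 : 2 ≤ m) (hm : m ≤ ones) (hinv : pvTabInv ones m st) :
    pvTabInv ones (m + 1) (pvBRow st m) := by
  obtain ⟨hl1, hl2, hj⟩ := hinv
  have hp1 : 1 ≤ pvPopcount m := pvPop_pos m (by omega)
  have hplt : pvPopcount m < m := pvPop_lt m hm2
  have hc1 := count1_pvToBin m (by omega)
  have hlen := length_pvToBin m (by omega)
  have hmlt : m < st.1.length := by omega
  have hmlt2 : m < st.2.length := by omega
  refine ⟨by simp [pvBRow, hl1], by simp [pvBRow, hl2], ?_⟩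
  intro j h1j hjm
  by_cases hjm' : j = m
  · subst hjm'
    obtain ⟨hs, hr⟩ := hj (pvPopcount j) hp1 (by omega)
    rw [pvChain, dif_neg (by omega : ¬ j ≤ 1)]
    simp only [pvBRow, hc1]
    rw [getD_set_self _ _ _ hmlt, getD_set_self _ _ _ hmlt2, hs, hr, hlen]
    exact ⟨rfl, rfl⟩
  · obtain ⟨hs, hr⟩ := hj j h1j (by omega)
    simp only [pvBRow]
    rw [getD_set_ne _ _ _ _ hjm', getD_set_ne _ _ _ _ hjm']
    exact ⟨hs, hr⟩

theorem pvTab_fold (ones m : Nat) (hm : 2 ≤ m) (hmo : m ≤ ones + 1)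
    (st : List Int × List Int) (hinv : pvTabInv ones 2 st) :
    pvTabInv ones m
      ((PySem.List.pyRange 2 (m : Int) 1).foldl (fun st k => pvBRow st k.toNat) st) := by
  induction m with
  | zero => omega
  | succ n ih =>
    by_cases hn2 : n < 2
    · have : n + 1 = 2 := by omega
      rw [this] at *
      rw [PySem.List.pyRange_one_eq_nil (by norm_num)]
      exact hinv
    · have h2n : 2 ≤ n := by omega
      have : ((n : Int) + 1) = ((n + 1 : Nat) : Int) := by push_cast; ring
      rw [← this, PySem.List.pyRange_one_succ_right (by omega : (2:Int) ≤ n),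
        List.foldl_append]
      simp only [List.foldl_cons, List.foldl_nil, Int.toNat_natCast]
      exact pvBRow_inv ones n _ h2n (by omega) (ih h2n (by omega))

-- ===== VERDICT (by name: the statement is the Claim_ definition above) =====
theorem solution_spec : Claim_equal_solution := by
  intro s _ hpre
  have h1 : 1 ≤ s.toList.count '1' := List.one_le_count_iff.mpr hpre
  show pvALoop _ s.toList 0 0 = _
  rw [pvALoop_closed _ _ _ _ h1 (by omega)]
  set ones := s.toList.count '1' with hones
  have hbase : pvTabInv ones 2
      (if 1 ≤ ones then (List.replicate (ones + 1) (0:Int)).set 1 1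
        else List.replicate (ones + 1) (0:Int),
       List.replicate (ones + 1) (0:Int)) := by
    rw [if_pos h1]
    refine ⟨by simp, by simp, ?_⟩
    intro j hj1 hj2
    have hj : j = 1 := by omega
    subst hj
    have hlt : 1 < (List.replicate (ones + 1) (0:Int)).length := by simp; omega
    rw [pvChain, dif_pos (by omega)]
    constructor
    · exact getD_set_self _ _ _ hlt
    · simp [List.getD, Nat.lt_iff_add_one_le.mpr h1]
  have hinv := pvTab_fold ones (ones + 1) (by omega) (le_refl _) _ hbase
  obtain ⟨_, _, hj⟩ := hinv
  obtain ⟨hs, hr⟩ := hj ones h1 (by omega)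
  show _ = solution_alt s
  simp only [solution_alt, ← hones]
  push_cast at hs hr
  rw [hs, hr]
  simp only [List.cons.injEq, and_true]
  constructor <;> ring
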